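-- pv_equiv track=rewrite | github.com/KLIEBHAN/collatz-patterns | src/core/refuel_test.py | simulate_refuel
-- ===== SOURCE A (Python) =====
-- def get_fuel(n):
--     """
--     Berechnet den 'Treibstoff' h(n) = v_2(n+1).
--     Das ist die Anzahl der Einsen am Ende der Binärdarstellung.
--     """
--     if n % 2 == 0:
--         return 0  # Sollte bei Collatz-Orbit (nur ungerade) nicht passieren
--     m = n + 1
--     val = 0
--     while m > 0 and m % 2 == 0:
--         val += 1
--         m //= 2
--     return val
--
-- def simulate_refuel(start_n, max_steps=10000):
--     n = start_n
--     t_values = []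
--     cumulative_refuel = []
--     current_refuel_sum = 0
--     step = 0
--
--     # Initiale Phase überspringen wir für die Statistik (das ist der C*log(n) Term)
--     # Wir wollen wissen, ob NACH dem Start "frischer" Sprit generiert wird.
--
--     while n > 1 and step < max_steps:
--         # 1. Bestimme aktuellen Treibstoff und Schritt-Typ
--         # Collatz Schritt auf ungeradem n: (3n+1) / 2^a
--         temp = 3 * n + 1
--         a = 0
--         while temp % 2 == 0:
--             a += 1
--             temp //= 2
--         next_n = temp
--
--         # LOGIK VON PERSON 2:
--         # Ein "Refuel Event" passiert nur, wenn wir neu auf einer ungeraden Zahl landen.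
--         # Wenn wir von n kommen, haben wir a Divisionen gemacht.
--         # Wenn a >= 2 war, war es ein "Reset" (Schrumpfung).
--         # Dann schauen wir, wie viel Sprit die NEUE Zahl next_n hat.
--
--         step += 1
--         if a >= 2:
--             # Wir sind gelandet. Wie voll ist der Tank von next_n?
--             fuel = get_fuel(next_n)
--             # Wir zählen nur fuel > 1 als "echten" Gewinn, da h(n)>=1 für alle ungeraden gilt.
--             # Person 2 nennt das (K_i - 1).
--             effective_refuel = max(0, fuel - 1)
--             current_refuel_sum += effective_refuel
--
--         t_values.append(step)
--         cumulative_refuel.append(current_refuel_sum)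
--
--         n = next_n
--
--     return t_values, cumulative_refuel
-- ===== SOURCE B (Python) =====
-- def simulate_refuel(start_n, max_steps=10000):
--     def _v2(m):
--         # 2-adic valuation of m (only called with m > 0)
--         return 0 if m % 2 else 1 + _v2(m // 2)
--
--     # pass 1: the orbit as a list of (a, next_n) steps
--     steps = []
--     n = start_n
--     while n > 1 and len(steps) < max_steps:
--         t = 3 * n + 1
--         a = _v2(t)
--         n = t >> a
--         steps.append((a, n))
--
--     # pass 2: statistics derived from the orbit
--     t_values = list(range(1, len(steps) + 1))
--     cumulative_refuel = []
--     s = 0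
--     for a, m in steps:
--         if a >= 2:
--             s += max(0, _v2(m + 1) - 1)
--         cumulative_refuel.append(s)
--     return t_values, cumulative_refuel
-- ===== Notes on version B (the rewrite author's own statement) =====
-- stated objective: alternative
-- what changed: A's single fused while-loop with mutable running statistics and two inline trial-division while-loops is replaced by a two-pass pipeline: pass one generates the orbit as a list of (a, next_n) steps using a recursive 2-adic-valuation helper and a shift, pass two derives t_values with range() and the cumulative refuel by a fold over that list.
import Mathlib
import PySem

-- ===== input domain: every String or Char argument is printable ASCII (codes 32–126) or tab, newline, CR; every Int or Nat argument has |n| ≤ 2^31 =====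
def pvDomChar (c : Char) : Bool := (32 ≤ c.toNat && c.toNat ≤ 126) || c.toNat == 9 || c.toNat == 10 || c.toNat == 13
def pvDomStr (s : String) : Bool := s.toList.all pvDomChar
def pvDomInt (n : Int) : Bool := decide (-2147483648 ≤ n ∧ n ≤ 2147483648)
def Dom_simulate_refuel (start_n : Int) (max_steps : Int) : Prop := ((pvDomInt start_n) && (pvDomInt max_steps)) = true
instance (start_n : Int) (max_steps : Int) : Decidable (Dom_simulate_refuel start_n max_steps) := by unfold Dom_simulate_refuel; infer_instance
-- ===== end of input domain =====

-- B replaces A's fused while-loop (inline trial-division loops + running statistics) by a two-pass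
-- pipeline: generate the orbit step list, then derive both statistics lists from it (objective: alternative).

-- ===== PORT A =====
-- the 'while m > 0 and m % 2 == 0' loop of get_fuel; the fuel argument only makes it total
-- (fuel = m.toNat is enough: for m ≤ 0 the loop body never runs, for m > 0 it runs ≤ m times)
def pvA_fuelLoop (fuel : Nat) (m val : Int) : Int :=
  match fuel with
  | 0 => val
  | f + 1 =>
    if 0 < m ∧ PySem.Int.mod m 2 = 0 then pvA_fuelLoop f (PySem.Int.floordiv m 2) (val + 1)
    else val

def get_fuel (n : Int) : Int :=
  if PySem.Int.mod n 2 = 0 then 0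
  else pvA_fuelLoop (n + 1).toNat (n + 1) 0

-- the inner 'while temp % 2 == 0' loop; fuel only makes it total (it is called with
-- temp = 3*n+1 > 0, where fuel = temp.toNat is enough)
def pvA_divLoop (fuel : Nat) (temp a : Int) : Int × Int :=
  match fuel with
  | 0 => (temp, a)
  | f + 1 =>
    if PySem.Int.mod temp 2 = 0 then pvA_divLoop f (PySem.Int.floordiv temp 2) (a + 1)
    else (temp, a)

-- A's main while loop; fuel k = max_steps - step encodes 'step < max_steps', the body is literal
def pvA_loop (k : Nat) (n step current_refuel_sum : Int)
    (t_values cumulative_refuel : List Int) : List Int × List Int :=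
  match k with
  | 0 => (t_values, cumulative_refuel)
  | k' + 1 =>
    if 1 < n then
      let temp := 3 * n + 1
      let r := pvA_divLoop temp.toNat temp 0
      let next_n := r.1
      let a := r.2
      let step' := step + 1
      let sum' :=
        if 2 ≤ a then current_refuel_sum + max 0 (get_fuel next_n - 1)
        else current_refuel_sum
      pvA_loop k' next_n step' sum' (t_values ++ [step']) (cumulative_refuel ++ [sum'])
    else (t_values, cumulative_refuel)

def simulate_refuel (start_n : Int) (max_steps : Int) : List Int × List Int :=
  pvA_loop max_steps.toNat start_n 0 0 [] []

-- ===== PORT B =====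
-- port of _v2 (recursion on m // 2); fuel = m.toNat is enough for the m > 0 inputs it is called on
def pvB_v2fuel (fuel : Nat) (m : Int) : Int :=
  match fuel with
  | 0 => 0
  | f + 1 =>
    if PySem.Int.mod m 2 = 0 then 1 + pvB_v2fuel f (PySem.Int.floordiv m 2)
    else 0

def pvB_v2 (m : Int) : Int := pvB_v2fuel m.toNat m

-- pass 1: the orbit as a list of (a, next_n) steps; fuel k = max_steps encodes 'len(steps) < max_steps'
def pvB_orbit (k : Nat) (n : Int) : List (Int × Int) :=
  match k with
  | 0 => []
  | k' + 1 =>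
    if 1 < n then
      let t := 3 * n + 1
      let a := pvB_v2 t
      let n' := PySem.Int.floordiv t (2 ^ a.toNat)  -- t >> a, exact here since t > 0 and a ≥ 0
      (a, n') :: pvB_orbit k' n'
    else []

-- pass 2: the 'for a, m in steps' loop threading the running sum s
def pvB_cum : List (Int × Int) → Int → List Int
  | [], _ => []
  | (a, m) :: rest, s =>
    let s' := if 2 ≤ a then s + max 0 (pvB_v2 (m + 1) - 1) else s
    s' :: pvB_cum rest s'

def simulate_refuel_alt (start_n : Int) (max_steps : Int) : List Int × List Int :=
  let steps := pvB_orbit max_steps.toNat start_n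
  (PySem.List.pyRange 1 ((steps.length : Int) + 1) 1, pvB_cum steps 0)

-- ===== PRECONDITION & SPEC =====
def Spec_simulate_refuel (start_n : Int) (max_steps : Int) (out : List Int × List Int) : Prop := out = simulate_refuel_alt start_n max_steps
instance (start_n : Int) (max_steps : Int) (out : List Int × List Int) : Decidable (Spec_simulate_refuel start_n max_steps out) := by unfold Spec_simulate_refuel; infer_instance

-- ===== CLAIM (what is proved, stated in full; the proofs are below) =====
def Claim_equal_simulate_refuel : Prop := ∀ (start_n : Int) (max_steps : Int), Dom_simulate_refuel start_n max_steps → Spec_simulate_refuel start_n max_steps (simulate_refuel start_n max_steps)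

-- ===== LEMMAS AND PROOFS =====

-- [step+1, step+2, ..., step+k] as a proof-side abbreviation
def pvTseq (a : Int) : Nat → List Int
  | 0 => []
  | k + 1 => a :: pvTseq (a + 1) k

lemma pv_mod2 (m : Int) : PySem.Int.mod m 2 = m % 2 :=
  PySem.Int.mod_eq_emod_of_pos (by norm_num)

lemma pv_div2 (m : Int) : PySem.Int.floordiv m 2 = m / 2 :=
  PySem.Int.floordiv_eq_ediv_of_pos (by norm_num)

lemma pv_divpow (m : Int) (k : Nat) : PySem.Int.floordiv m (2 ^ k) = m / 2 ^ k :=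
  PySem.Int.floordiv_eq_ediv_of_pos (by positivity)

lemma pvB_v2fuel_nonneg : ∀ (f : Nat) (m : Int), 0 ≤ pvB_v2fuel f m := by
  intro f
  induction f with
  | zero => intro m; simp [pvB_v2fuel]
  | succ f ih =>
    intro m
    simp only [pvB_v2fuel]
    split
    · have := ih (PySem.Int.floordiv m 2); omega
    · omega

lemma pvB_v2_nonneg (m : Int) : 0 ≤ pvB_v2 m := pvB_v2fuel_nonneg _ m

lemma pvB_v2fuel_congr : ∀ (f1 f2 : Nat) (m : Int), 0 < m → m.toNat ≤ f1 → m.toNat ≤ f2 →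
    pvB_v2fuel f1 m = pvB_v2fuel f2 m := by
  intro f1
  induction f1 with
  | zero => intro f2 m hm h1 _; omega
  | succ f1 ih =>
    intro f2 m hm h1 h2
    obtain ⟨f2', rfl⟩ : ∃ f2', f2 = f2' + 1 := ⟨f2 - 1, by omega⟩
    simp only [pvB_v2fuel, pv_mod2, pv_div2]
    split
    · rename_i he
      exact congrArg (1 + ·) (ih f2' (m / 2) (by omega) (by omega) (by omega))
    · rfl

lemma pvB_v2_even (m : Int) (hm : 0 < m) (he : m % 2 = 0) :
    pvB_v2 m = 1 + pvB_v2 (m / 2) := by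
  obtain ⟨f, hf⟩ : ∃ f, m.toNat = f + 1 := ⟨m.toNat - 1, by omega⟩
  unfold pvB_v2
  rw [hf]
  simp only [pvB_v2fuel, pv_mod2, pv_div2, if_pos he]
  rw [pvB_v2fuel_congr f (m / 2).toNat (m / 2) (by omega) (by omega) le_rfl]

lemma pvB_v2_odd (m : Int) (ho : m % 2 ≠ 0) : pvB_v2 m = 0 := by
  unfold pvB_v2
  cases h : m.toNat with
  | zero => simp [pvB_v2fuel]
  | succ f => simp only [pvB_v2fuel, pv_mod2, if_neg ho]

-- the odd part t / 2^(v2 t) is odd and positive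
lemma pvB_oddPart_spec : ∀ (f : Nat) (t : Int), 0 < t → t.toNat ≤ f →
    (t / 2 ^ (pvB_v2 t).toNat) % 2 ≠ 0 ∧ 0 < t / 2 ^ (pvB_v2 t).toNat := by
  intro f
  induction f with
  | zero => intro t ht hf; omega
  | succ f ih =>
    intro t ht hf
    by_cases he : t % 2 = 0
    · have hv := pvB_v2_even t ht he
      have hnn := pvB_v2_nonneg (t / 2)
      have hk : (pvB_v2 t).toNat = (pvB_v2 (t / 2)).toNat + 1 := by omega
      have hdd : t / 2 ^ (pvB_v2 t).toNat = t / 2 / 2 ^ (pvB_v2 (t / 2)).toNat := by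
        rw [hk, pow_succ', ← Int.ediv_ediv_of_nonneg (by norm_num : (0:Int) ≤ 2)]
      rw [hdd]
      exact ih (t / 2) (by omega) (by omega)
    · rw [pvB_v2_odd t he]
      simp only [Int.toNat_zero, pow_zero, Int.ediv_one]
      exact ⟨he, ht⟩

-- A's trial-division loop computes B's (odd part, v2)
lemma pvA_divLoop_eq : ∀ (f : Nat) (t a : Int), 0 < t → t.toNat ≤ f →
    pvA_divLoop f t a = (PySem.Int.floordiv t (2 ^ (pvB_v2 t).toNat), a + pvB_v2 t) := by
  intro f
  induction f with
  | zero => intro t a ht hf; omega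
  | succ f ih =>
    intro t a ht hf
    simp only [pvA_divLoop, pv_mod2, pv_div2, pv_divpow]
    by_cases he : t % 2 = 0
    · rw [if_pos he, ih (t / 2) (a + 1) (by omega) (by omega)]
      have hv := pvB_v2_even t ht he
      have hnn := pvB_v2_nonneg (t / 2)
      have hk : (pvB_v2 t).toNat = (pvB_v2 (t / 2)).toNat + 1 := by omega
      rw [pv_divpow]
      simp only [Prod.mk.injEq]
      refine ⟨?_, by omega⟩
      rw [hk, pow_succ', Int.ediv_ediv_of_nonneg (by norm_num : (0:Int) ≤ 2)]
    · rw [if_neg he, pvB_v2_odd t he]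
      simp

-- A's get_fuel loop computes B's v2 of m
lemma pvA_fuelLoop_eq : ∀ (f : Nat) (m val : Int), 0 < m → m.toNat ≤ f →
    pvA_fuelLoop f m val = val + pvB_v2 m := by
  intro f
  induction f with
  | zero => intro m val hm hf; omega
  | succ f ih =>
    intro m val hm hf
    simp only [pvA_fuelLoop, pv_mod2, pv_div2]
    by_cases he : m % 2 = 0
    · rw [if_pos ⟨hm, he⟩, ih (m / 2) (val + 1) (by omega) (by omega),
        pvB_v2_even m hm he]
      omega
    · rw [if_neg (by simp [he]), pvB_v2_odd m he]
      omega

lemma get_fuel_eq (n : Int) (hn : 0 < n) (ho : n % 2 ≠ 0) :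
    get_fuel n = pvB_v2 (n + 1) := by
  unfold get_fuel
  rw [pv_mod2, if_neg ho, pvA_fuelLoop_eq (n + 1).toNat (n + 1) 0 (by omega) le_rfl]
  omega

lemma pvTseq_eq_pyRange : ∀ (k : Nat) (a : Int),
    pvTseq a k = PySem.List.pyRange a (a + (k : Int)) 1 := by
  intro k
  induction k with
  | zero =>
    intro a
    simp only [pvTseq, Nat.cast_zero, add_zero]
    exact (PySem.List.pyRange_one_eq_nil le_rfl).symm
  | succ k ih =>
    intro a
    have h2 : a + ((k + 1 : Nat) : Int) = (a + 1) + (k : Int) := by push_cast; ring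
    rw [PySem.List.pyRange_one_cons (by push_cast; omega), h2]
    simp only [pvTseq]
    rw [ih (a + 1)]

lemma pvA_loop_eq : ∀ (k : Nat) (n step s : Int) (tv cr : List Int),
    pvA_loop k n step s tv cr =
      (tv ++ pvTseq (step + 1) (pvB_orbit k n).length, cr ++ pvB_cum (pvB_orbit k n) s) := by
  intro k
  induction k with
  | zero => intro n step s tv cr; simp [pvA_loop, pvB_orbit, pvTseq, pvB_cum]
  | succ k ih =>
    intro n step s tv cr
    by_cases hn : 1 < n
    · have ht : (0 : Int) < 3 * n + 1 := by omega
      have hdiv := pvA_divLoop_eq (3 * n + 1).toNat (3 * n + 1) 0 ht le_rfl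
      have hodd := pvB_oddPart_spec (3 * n + 1).toNat (3 * n + 1) ht le_rfl
      rw [← pv_divpow] at hodd
      simp only [pvA_loop, pvB_orbit, if_pos hn, hdiv]
      rw [get_fuel_eq _ hodd.2 hodd.1, ih]
      simp only [pvB_cum, pvTseq, List.length_cons, zero_add]
      simp
    · simp [pvA_loop, pvB_orbit, hn, pvTseq, pvB_cum]

-- ===== VERDICT (by name: the statement is the Claim_ definition above) =====
theorem simulate_refuel_spec : Claim_equal_simulate_refuel := by
  intro start_n max_steps _
  unfold Spec_simulate_refuel simulate_refuel simulate_refuel_alt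
  rw [pvA_loop_eq]
  simp only [List.nil_append]
  rw [pvTseq_eq_pyRange]
  congr 2
  omega
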